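-- pv_equiv track=rewrite | github.com/Rotoslider/ForgeRAG | scripts/cleanup_numeric_garbage.py | _longest_nondigit_run
-- ===== SOURCE A (Python) =====
-- def _longest_nondigit_run(s: str) -> int:
--     cur = best = 0
--     for ch in s:
--         if ch.isdigit():
--             cur = 0
--         else:
--             cur += 1
--             if cur > best:
--                 best = cur
--     return best
-- ===== SOURCE B (Python) =====
-- def _longest_nondigit_run(s: str) -> int:
--     best = 0
--     i = 0
--     n = len(s)
--     while i < n:
--         if s[i].isdigit():
--             i += 1
--         else:
--             j = i + 1
--             while j < n and not s[j].isdigit():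
--                 j += 1
--             if j - i > best:
--                 best = j - i
--             i = j
--     return best
-- ===== Notes on version B (the rewrite author's own statement) =====
-- stated objective: alternative
-- what changed: Replaces the per-character cur/best counter threading with a run-jumping scan: at each non-digit position it scans to the end of that maximal non-digit run, records its length via max, and jumps past it.
import Mathlib
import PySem

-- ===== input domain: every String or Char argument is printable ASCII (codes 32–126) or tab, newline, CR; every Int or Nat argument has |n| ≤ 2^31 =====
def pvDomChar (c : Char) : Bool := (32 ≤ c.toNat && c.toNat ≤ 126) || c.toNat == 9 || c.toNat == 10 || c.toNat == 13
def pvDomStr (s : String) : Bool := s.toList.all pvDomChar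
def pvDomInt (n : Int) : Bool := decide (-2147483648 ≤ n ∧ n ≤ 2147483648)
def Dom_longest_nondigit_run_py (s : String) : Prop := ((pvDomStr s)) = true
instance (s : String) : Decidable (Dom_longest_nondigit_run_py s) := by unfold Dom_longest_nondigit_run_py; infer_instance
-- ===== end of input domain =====

-- B replaces A's per-character cur/best counter with a run-jumping scan (find each maximal
-- non-digit run, take max of its length, jump past it); alternative decomposition, same cost.


-- ===== PORT A =====
-- A-side helper: the loop body of A (one character step on the (cur, best) state)
def pvStepA (st : Int × Int) (ch : Char) : Int × Int :=
  if PySem.Chars.isdigit ch then ((0 : Int), st.2)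
  else
    let cur := st.1 + 1
    (cur, if cur > st.2 then cur else st.2)

-- literal port: fold the (cur, best) state over the characters, return best
def longest_nondigit_run_py (s : String) : Int :=
  (s.toList.foldl pvStepA ((0 : Int), (0 : Int))).2

-- ===== PORT B =====
-- port of Source B's outer while loop: skip a digit, or measure the maximal non-digit run
-- starting here (inner scan = takeWhile) and jump past it (dropWhile)
def longest_nondigit_run_py_go : List Char → Int
  | [] => 0
  | c :: rest =>
    if PySem.Chars.isdigit c then longest_nondigit_run_py_go rest
    else
      max (((c :: rest).takeWhile (fun d => !PySem.Chars.isdigit d)).length : Int)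
          (longest_nondigit_run_py_go ((c :: rest).dropWhile (fun d => !PySem.Chars.isdigit d)))
termination_by l => l.length
decreasing_by
  · simp
  · rename_i h
    simp [h]
    exact List.length_dropWhile_le _ _

def longest_nondigit_run_py_alt (s : String) : Int :=
  longest_nondigit_run_py_go s.toList

-- ===== PRECONDITION & SPEC =====
def Spec_longest_nondigit_run_py (s : String) (out : Int) : Prop := out = longest_nondigit_run_py_alt s
instance (s : String) (out : Int) : Decidable (Spec_longest_nondigit_run_py s out) := by unfold Spec_longest_nondigit_run_py; infer_instance

-- ===== CLAIM (what is proved, stated in full; the proofs are below) =====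
def Claim_equal_longest_nondigit_run_py : Prop := ∀ (s : String), Dom_longest_nondigit_run_py s → Spec_longest_nondigit_run_py s (longest_nondigit_run_py s)

-- ===== LEMMAS AND PROOFS =====

-- pvH cur l = the final `best` of A's loop run over l from counter cur with best = cur:
-- the max of cur-extended-first-run and all later non-digit run lengths.
def pvH (cur : Int) : List Char → Int
  | [] => cur
  | c :: rest => if PySem.Chars.isdigit c then max cur (pvH 0 rest) else pvH (cur + 1) rest

theorem pvH_ge (l : List Char) : ∀ cur : Int, cur ≤ pvH cur l := by
  induction l with
  | nil => intro cur; simp [pvH]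
  | cons c rest ih =>
    intro cur
    by_cases h : PySem.Chars.isdigit c
    · simp [pvH, h]
    · simpa [pvH, h] using le_trans (by omega : cur ≤ cur + 1) (ih (cur + 1))

theorem foldA_eq_pvH (l : List Char) : ∀ cur best : Int, 0 ≤ cur → cur ≤ best →
    (l.foldl pvStepA (cur, best)).2 = max best (pvH cur l) := by
  induction l with
  | nil => intro cur best h0c hcb; simp [pvH]; omega
  | cons c rest ih =>
    intro cur best h0c hcb
    rw [List.foldl_cons]
    by_cases h : PySem.Chars.isdigit c
    · have hstep : pvStepA (cur, best) c = (0, best) := by simp [pvStepA, h]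
      rw [hstep, ih 0 best le_rfl (by omega)]
      have h0 := pvH_ge rest (0 : Int)
      simp [pvH, h]
      omega
    · have hstep : pvStepA (cur, best) c =
          (cur + 1, if cur + 1 > best then cur + 1 else best) := by
        simp [pvStepA, h]
      rw [hstep, ih (cur + 1) _ (by omega) (by split_ifs <;> omega)]
      have hr := pvH_ge rest (cur + 1)
      simp [pvH, h]
      split_ifs <;> omega

-- pvH jumps over a maximal non-digit prefix in one step
theorem pvH_shift (l : List Char) : ∀ cur : Int,
    pvH cur l = pvH (cur + ((l.takeWhile (fun d => !PySem.Chars.isdigit d)).length : Int))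
                    (l.dropWhile (fun d => !PySem.Chars.isdigit d)) := by
  induction l with
  | nil => intro cur; simp [pvH]
  | cons c rest ih =>
    intro cur
    by_cases h : PySem.Chars.isdigit c
    · simp [h, pvH]
    · simp [h, pvH, ih (cur + 1)]
      ring_nf

-- the head of dropWhile (if any) fails the kept predicate, i.e. is a digit here
theorem dropWhile_head_digit (l : List Char) :
    ∀ c' r', l.dropWhile (fun d => !PySem.Chars.isdigit d) = c' :: r' →
      PySem.Chars.isdigit c' = true := by
  induction l with
  | nil => intro c' r' h; simp at h
  | cons c rest ih =>
    intro c' r' h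
    by_cases hd : PySem.Chars.isdigit c
    · rw [List.dropWhile_cons, if_neg (by simp [hd])] at h
      cases h
      exact hd
    · rw [List.dropWhile_cons, if_pos (by simp [hd])] at h
      exact ih c' r' h

theorem go_eq_pvH (l : List Char) : longest_nondigit_run_py_go l = pvH 0 l := by
  induction l using longest_nondigit_run_py_go.induct with
  | case1 => simp [longest_nondigit_run_py_go, pvH]
  | case2 c rest h ih =>
    rw [longest_nondigit_run_py_go, if_pos h, ih]
    have h0 := pvH_ge rest (0 : Int)
    simp [pvH, h]
    omega
  | case3 c rest h ih =>
    rw [longest_nondigit_run_py_go, if_neg h, ih, pvH_shift (c :: rest) 0, zero_add]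
    generalize hd : List.dropWhile (fun d => !PySem.Chars.isdigit d) (c :: rest) = dl
    cases dl with
    | nil => simp [pvH]
    | cons c' r' =>
      have hdig := dropWhile_head_digit (c :: rest) c' r' hd
      have h0 := pvH_ge r' (0 : Int)
      simp [pvH, hdig]
      omega

-- ===== VERDICT (by name: the statement is the Claim_ definition above) =====
theorem longest_nondigit_run_py_spec : Claim_equal_longest_nondigit_run_py := by
  intro s _
  unfold Spec_longest_nondigit_run_py longest_nondigit_run_py longest_nondigit_run_py_alt
  rw [foldA_eq_pvH s.toList 0 0 le_rfl le_rfl, go_eq_pvH]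
  have := pvH_ge s.toList (0 : Int)
  omega
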